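-- pv_equiv track=rewrite | github.com/ngthanhtin/textual_grounding | utils/visualize_fs_reading.py | highlight_tags
-- ===== SOURCE A (Python) =====
-- def highlight_tags(text):
--     # Define a color map for different facts
--     color_map = {
--         1: '#FFD700',  # Gold for <fact1>
--         2: '#ADFF2F',  # GreenYellow for <fact2>
--         3: '#87CEEB',  # SkyBlue for <fact3>
--         4: '#FF69B4',  # HotPink for <fact4>
--         5: '#FFA500',  # Orange for <fact5>
--         6: '#90EE90',  # LightGreen for <fact6>
--         7: '#FF6347',  # Tomato for <fact7>
--         8: '#8A2BE2'   # BlueViolet for <fact8>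
--     }
--
--     # Highlight each <fact1> to <fact8> with a corresponding color
--     for i in range(1, 9):
--         start_tag = f"<fact{i}>"
--         end_tag = f"</fact{i}>"
--         color = color_map.get(i, '#FFFFFF')  # Default to white if no color is found (though we map up to 8)
--         text = text.replace(start_tag, f'<span style="background-color: {color}; font-weight: bold;">')
--         text = text.replace(end_tag, '</span>')
--
--     return text
-- ===== SOURCE B (Python) =====
-- def highlight_tags(text):
--     # Single left-to-right scan: emit a styled span when a <factN>/</factN> tag
--     # (N in 1..8) starts at the cursor, otherwise copy one character.
--     color_map = {
--         '1': '#FFD700',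
--         '2': '#ADFF2F',
--         '3': '#87CEEB',
--         '4': '#FF69B4',
--         '5': '#FFA500',
--         '6': '#90EE90',
--         '7': '#FF6347',
--         '8': '#8A2BE2',
--     }
--     out = []
--     i = 0
--     n = len(text)
--     while i < n:
--         if text[i] == '<':
--             close = text[i+1:i+2] == '/'
--             j = i + (2 if close else 1)
--             if text[j:j+4] == 'fact' and text[j+4:j+5] in color_map and text[j+5:j+6] == '>':
--                 if close:
--                     out.append('</span>')
--                 else:
--                     color = color_map[text[j+4]]
--                     out.append(f'<span style="background-color: {color}; font-weight: bold;">')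
--                 i = j + 6
--                 continue
--         out.append(text[i])
--         i += 1
--     return ''.join(out)
-- ===== Notes on version B (the rewrite author's own statement) =====
-- stated objective: alternative
-- what changed: B replaces A's sixteen sequential whole-string .replace passes by a single left-to-right scan that, at each position, either emits the styled span for a <factN>/</factN> tag (N in 1..8) found at the cursor or copies one character.
import Mathlib
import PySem

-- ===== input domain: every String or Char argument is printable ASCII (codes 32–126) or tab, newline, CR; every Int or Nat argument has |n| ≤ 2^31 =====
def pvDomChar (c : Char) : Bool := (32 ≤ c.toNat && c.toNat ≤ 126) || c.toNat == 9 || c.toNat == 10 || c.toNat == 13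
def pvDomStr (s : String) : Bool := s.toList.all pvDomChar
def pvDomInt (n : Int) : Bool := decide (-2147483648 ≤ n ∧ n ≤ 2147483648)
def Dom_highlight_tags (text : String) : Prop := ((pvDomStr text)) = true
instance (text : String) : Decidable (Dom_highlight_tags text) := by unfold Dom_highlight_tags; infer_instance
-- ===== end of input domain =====

-- B replaces A's sixteen sequential whole-string replace passes by one left-to-right scan
-- that emits a styled span per <factN>/</factN> tag (objective: alternative single-pass algorithm).

-- ===== PORT A =====
-- A-side helper: A's color_map dict literal
def hlAColorMap : PySem.Dict Int String :=
  PySem.Dict.ofList [(1, "#FFD700"), (2, "#ADFF2F"), (3, "#87CEEB"), (4, "#FF69B4"),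
    (5, "#FFA500"), (6, "#90EE90"), (7, "#FF6347"), (8, "#8A2BE2")]

def highlight_tags (text : String) : String :=
  let color_map := hlAColorMap
  (PySem.List.pyRange 1 9 1).foldl (fun text i =>
    let start_tag := "<fact" ++ PySem.Int.toStr i ++ ">"
    let end_tag := "</fact" ++ PySem.Int.toStr i ++ ">"
    let color := color_map.getD i "#FFFFFF"
    let text := PySem.Str.replace text start_tag ("<span style=\"background-color: " ++ color ++ "; font-weight: bold;\">")
    PySem.Str.replace text end_tag "</span>") text

-- ===== PORT B =====
-- B-side helper: Source B's color_map, keyed by the digit character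
def hlColorMap : PySem.Dict Char String :=
  PySem.Dict.ofList [('1', "#FFD700"), ('2', "#ADFF2F"), ('3', "#87CEEB"), ('4', "#FF69B4"),
    ('5', "#FFA500"), ('6', "#90EE90"), ('7', "#FF6347"), ('8', "#8A2BE2")]


-- Source B's tag test at the cursor: '<', optional '/', "fact", a digit that is a key of
-- color_map, '>'; returns the emitted piece and the rest of the input after the tag
def hlTry : List Char → Option (List Char × List Char)
  | '<' :: '/' :: 'f' :: 'a' :: 'c' :: 't' :: d :: '>' :: t =>
      if hlColorMap.contains d then some ("</span>".toList, t) else none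
  | '<' :: 'f' :: 'a' :: 'c' :: 't' :: d :: '>' :: t =>
      if hlColorMap.contains d then
        some (("<span style=\"background-color: " ++ hlColorMap.getD d "" ++ "; font-weight: bold;\">").toList, t)
      else none
  | _ => none


-- termination helper for the scanner below (cited by hlGo's decreasing_by)
lemma hlTry_len : ∀ (l r u : List Char), hlTry l = some (r, u) → u.length < l.length := by
  intro l r u h
  unfold hlTry at h
  split at h
  · split at h
    · obtain ⟨rfl, rfl⟩ := Prod.mk.injEq .. ▸ Option.some.inj h
      simp; omega
    · exact absurd h (by simp)
  · split at h
    · obtain ⟨rfl, rfl⟩ := Prod.mk.injEq .. ▸ Option.some.inj h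
      simp; omega
    · exact absurd h (by simp)
  · exact absurd h (by simp)


-- Source B's while loop: one pass, emitting either a span or a single character
def hlGo (l : List Char) : List Char :=
  if h : (hlTry l).isSome then
    ((hlTry l).get h).1 ++ hlGo ((hlTry l).get h).2
  else
    match l with
    | [] => []
    | c :: t => c :: hlGo t
termination_by l.length
decreasing_by
  · exact hlTry_len l _ _ (Option.some_get h).symm
  · simp


def highlight_tags_alt (text : String) : String :=
  String.ofList (hlGo text.toList)

-- ===== PRECONDITION & SPEC =====
def Spec_highlight_tags (text : String) (out : String) : Prop := out = highlight_tags_alt text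
instance (text : String) (out : String) : Decidable (Spec_highlight_tags text out) := by unfold Spec_highlight_tags; infer_instance

-- ===== CLAIM (what is proved, stated in full; the proofs are below) =====
def Claim_equal_highlight_tags : Prop := ∀ (text : String), Dom_highlight_tags text → Spec_highlight_tags text (highlight_tags text)

-- ===== LEMMAS AND PROOFS =====

lemma go_spec (old new : List Char) (hne : old ≠ []) :
    ∀ fuel l acc, l.length ≤ fuel →
      PySem.Chars.replace.go old new fuel l acc =
        acc.reverse ++ PySem.Chars.replace.go old new l.length l [] := by
  have hpos : 0 < old.length := List.length_pos_of_ne_nil hne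
  intro fuel
  induction fuel using Nat.strong_induction_on with
  | _ fuel ih =>
    intro l acc hl
    match fuel, l with
    | 0, l =>
      have : l = [] := List.eq_nil_of_length_eq_zero (Nat.le_zero.mp hl)
      subst this
      rw [PySem.Chars.replace.go.eq_def, PySem.Chars.replace.go.eq_def]; simp
    | n+1, [] =>
      rw [PySem.Chars.replace.go.eq_def, PySem.Chars.replace.go.eq_def]; simp
    | n+1, c :: t =>
      have ht : t.length ≤ n := by simpa using hl
      rw [PySem.Chars.replace.go.eq_def]
      conv_rhs => rw [List.length_cons, PySem.Chars.replace.go.eq_def]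
      by_cases hpre : old.isPrefixOf (c :: t) = true
      · simp only [hpre, if_pos]
        have hdl : (List.drop old.length (c :: t)).length ≤ t.length := by
          simp [List.length_drop]; omega
        rw [ih n (by omega) _ _ (le_trans hdl ht), ih t.length (by omega) _ _ hdl]
        simp
      · simp only [hpre, if_neg, Bool.false_eq_true, not_false_iff]
        rw [ih n (by omega) t (c :: acc) ht, ih t.length (by omega) t [c] le_rfl]
        simp

lemma replace_nil (old new : List Char) (h : old ≠ []) :
    PySem.Chars.replace [] old new = [] := by
  rw [PySem.Chars.replace]
  simp [List.isEmpty_iff, h]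
  rw [PySem.Chars.replace.go.eq_def]; simp

lemma replace_eq_go (old new l : List Char) (h : old ≠ []) :
    PySem.Chars.replace l old new = PySem.Chars.replace.go old new l.length l [] := by
  rw [PySem.Chars.replace]
  simp [List.isEmpty_iff, h]

lemma replace_prefix (old new l : List Char) (h : old ≠ []) (hp : old <+: l) :
    PySem.Chars.replace l old new = new ++ PySem.Chars.replace (l.drop old.length) old new := by
  have hpos : 0 < old.length := List.length_pos_of_ne_nil h
  match l with
  | [] =>
    exact absurd (List.prefix_nil.mp hp) h
  | c :: t =>
    rw [replace_eq_go _ _ _ h, replace_eq_go _ _ _ h]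
    rw [List.length_cons, PySem.Chars.replace.go.eq_def]
    have hpre : old.isPrefixOf (c :: t) = true := List.isPrefixOf_iff_prefix.mpr hp
    simp only [hpre, if_pos]
    have hdl : (List.drop old.length (c :: t)).length ≤ t.length := by
      simp [List.length_drop]; omega
    rw [go_spec old new h t.length _ _ hdl]
    simp

lemma replace_cons (old new : List Char) (c : Char) (t : List Char) (h : old ≠ [])
    (hp : ¬ old <+: (c :: t)) :
    PySem.Chars.replace (c :: t) old new = c :: PySem.Chars.replace t old new := by
  rw [replace_eq_go _ _ _ h, replace_eq_go _ _ _ h]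
  rw [List.length_cons, PySem.Chars.replace.go.eq_def]
  have hpre : ¬ old.isPrefixOf (c :: t) = true := by
    rw [List.isPrefixOf_iff_prefix]; exact hp
  simp only [if_neg hpre]
  rw [go_spec old new h t.length t [c] le_rfl]
  simp

def misB (tag b : List Char) : Bool :=
  (List.range (min tag.length b.length)).any (fun k => !(tag[k]? == b[k]?))

lemma not_prefix_of_misB {tag b : List Char} (h : misB tag b = true) (x : List Char) :
    ¬ tag <+: (b ++ x) := by
  simp only [misB, List.any_eq_true, List.mem_range, Bool.not_eq_eq_eq_not, Bool.not_true,
    beq_eq_false_iff_ne, ne_eq] at h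
  obtain ⟨k, hk, hne⟩ := h
  have hkt : k < tag.length := lt_of_lt_of_le hk (min_le_left _ _)
  have hkb : k < b.length := lt_of_lt_of_le hk (min_le_right _ _)
  intro hp
  have h1 : tag[k]'hkt = (b ++ x)[k]'(by simp; omega) := hp.getElem hkt
  have h2 : (b ++ x)[k]'(by simp; omega) = b[k]'hkb := List.getElem_append_left hkb
  apply hne
  rw [List.getElem?_eq_getElem hkt, List.getElem?_eq_getElem hkb, h1, h2]

lemma rep_pass_noLt (tag new : List Char) (h0 : tag.head? = some '<') :
    ∀ b x, '<' ∉ b → PySem.Chars.replace (b ++ x) tag new = b ++ PySem.Chars.replace x tag new := by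
  have htag : tag ≠ [] := by intro h; subst h; simp at h0
  intro b
  induction b with
  | nil => simp
  | cons c b' ih =>
    intro x hb
    obtain ⟨tg, rfl⟩ : ∃ tg, tag = '<' :: tg := by
      cases tag with
      | nil => simp at h0
      | cons a tg =>
        simp only [List.head?_cons, Option.some.injEq] at h0
        exact ⟨tg, by rw [h0]⟩
    have hnp : ¬ ('<' :: tg) <+: (c :: (b' ++ x)) := by
      intro hp
      rw [List.cons_prefix_cons] at hp
      exact hb (by rw [hp.1]; exact List.mem_cons_self ..)
    rw [List.cons_append, replace_cons _ _ _ _ htag hnp, ih x (fun hm => hb (List.mem_cons_of_mem _ hm)), List.cons_append]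

lemma rep_pass_block (tag new B x : List Char) (h0 : tag.head? = some '<')
    (hm : misB tag B = true) (ht : '<' ∉ B.tail) :
    PySem.Chars.replace (B ++ x) tag new = B ++ PySem.Chars.replace x tag new := by
  have htag : tag ≠ [] := by intro h; subst h; simp at h0
  cases B with
  | nil => simp [misB] at hm
  | cons c B' =>
    have hnp : ¬ tag <+: (c :: (B' ++ x)) := by
      have := not_prefix_of_misB hm x
      rwa [List.cons_append] at this
    rw [List.cons_append, replace_cons _ _ _ _ htag hnp,
      rep_pass_noLt tag new h0 B' x (by simpa using ht), List.cons_append]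

def repStep (s : List Char) (p : List Char × List Char) : List Char :=
  PySem.Chars.replace s p.1 p.2

lemma chain_pass (stages : List (List Char × List Char))
    (hs : ∀ p ∈ stages, p.1.head? = some '<')
    (B : List Char) (hm : ∀ p ∈ stages, misB p.1 B = true) (ht : '<' ∉ B.tail) :
    ∀ r, stages.foldl repStep (B ++ r) = B ++ stages.foldl repStep r := by
  induction stages with
  | nil => intro r; simp
  | cons p rest ih =>
    intro r
    simp only [List.foldl_cons]
    rw [show repStep (B ++ r) p = B ++ repStep r p from
      rep_pass_block p.1 p.2 B r (hs p (List.mem_cons_self ..)) (hm p (List.mem_cons_self ..)) ht]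
    exact ih (fun q hq => hs q (List.mem_cons_of_mem _ hq))
      (fun q hq => hm q (List.mem_cons_of_mem _ hq)) (repStep r p)

lemma prefix_reflect (tag new : List Char) (htag : tag ≠ []) (hnew : new.head? = some '<') :
    ∀ n u w, '<' ∉ w → u.length ≤ n → w <+: PySem.Chars.replace u tag new → w <+: u := by
  intro n
  induction n with
  | zero =>
    intro u w hw hu hp
    have : u = [] := List.eq_nil_of_length_eq_zero (Nat.le_zero.mp hu)
    subst this
    rwa [replace_nil _ _ htag] at hp
  | succ n ih =>
    intro u w hw hu hp
    by_cases htp : tag <+: u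
    · rw [replace_prefix _ _ _ htag htp] at hp
      cases w with
      | nil => exact List.nil_prefix
      | cons a w' =>
        exfalso
        obtain ⟨nw, rfl⟩ : ∃ nw, new = '<' :: nw := by
          cases new with
          | nil => simp at hnew
          | cons b nw =>
            simp only [List.head?_cons, Option.some.injEq] at hnew
            exact ⟨nw, by rw [hnew]⟩
        rw [List.cons_append, List.cons_prefix_cons] at hp
        exact hw (hp.1 ▸ List.mem_cons_self ..)
    · cases u with
      | nil =>
        rwa [replace_nil _ _ htag] at hp
      | cons c t =>
        rw [replace_cons _ _ _ _ htag htp] at hp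
        cases w with
        | nil => exact List.nil_prefix
        | cons a w' =>
          rw [List.cons_prefix_cons] at hp
          have hw' : w' <+: t :=
            ih t w' (fun hm => hw (List.mem_cons_of_mem _ hm)) (by simpa using hu) hp.2
          exact List.cons_prefix_cons.mpr ⟨hp.1, hw'⟩

lemma chain_cons (stages : List (List Char × List Char))
    (hs : ∀ p ∈ stages, p.1 ≠ [] ∧ p.1.head? = some '<' ∧ '<' ∉ p.1.tail ∧ p.2.head? = some '<') :
    ∀ c t, (∀ p ∈ stages, ¬ p.1 <+: c :: t) →
      stages.foldl repStep (c :: t) = c :: stages.foldl repStep t := by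
  induction stages with
  | nil => intro c t _; simp
  | cons p rest ih =>
    intro c t hnp
    have hp := hs p (List.mem_cons_self ..)
    have h1 : repStep (c :: t) p = c :: repStep t p :=
      replace_cons _ _ _ _ hp.1 (hnp p (List.mem_cons_self ..))
    simp only [List.foldl_cons, h1]
    apply ih (fun q hq => hs q (List.mem_cons_of_mem _ hq))
    intro q hq hqp
    have hq' := hs q (List.mem_cons_of_mem _ hq)
    obtain ⟨w, hqw⟩ : ∃ w, q.1 = '<' :: w := by
      cases hq1 : q.1 with
      | nil => exact absurd hq1 hq'.1
      | cons a w =>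
        have := hq'.2.1
        rw [hq1] at this
        simp only [List.head?_cons, Option.some.injEq] at this
        exact ⟨w, by rw [this]⟩
    rw [hqw, List.cons_prefix_cons] at hqp
    have hw : '<' ∉ w := by
      have := hq'.2.2.1
      rwa [hqw] at this
    have hwt : w <+: t :=
      prefix_reflect p.1 p.2 hp.1 hp.2.2.2 t.length t w hw le_rfl hqp.2
    exact hnp q (List.mem_cons_of_mem _ hq)
      (by rw [hqw]; exact List.cons_prefix_cons.mpr ⟨hqp.1, hwt⟩)

def T16 : List (List Char × List Char) :=
  [ ("<fact1>".toList, "<span style=\"background-color: #FFD700; font-weight: bold;\">".toList),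
    ("</fact1>".toList, "</span>".toList),
    ("<fact2>".toList, "<span style=\"background-color: #ADFF2F; font-weight: bold;\">".toList),
    ("</fact2>".toList, "</span>".toList),
    ("<fact3>".toList, "<span style=\"background-color: #87CEEB; font-weight: bold;\">".toList),
    ("</fact3>".toList, "</span>".toList),
    ("<fact4>".toList, "<span style=\"background-color: #FF69B4; font-weight: bold;\">".toList),
    ("</fact4>".toList, "</span>".toList),
    ("<fact5>".toList, "<span style=\"background-color: #FFA500; font-weight: bold;\">".toList),
    ("</fact5>".toList, "</span>".toList),
    ("<fact6>".toList, "<span style=\"background-color: #90EE90; font-weight: bold;\">".toList),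
    ("</fact6>".toList, "</span>".toList),
    ("<fact7>".toList, "<span style=\"background-color: #FF6347; font-weight: bold;\">".toList),
    ("</fact7>".toList, "</span>".toList),
    ("<fact8>".toList, "<span style=\"background-color: #8A2BE2; font-weight: bold;\">".toList),
    ("</fact8>".toList, "</span>".toList) ]

def chainT (l : List Char) : List Char := T16.foldl repStep l

set_option maxHeartbeats 1000000 in
lemma GOODshape : ∀ p ∈ T16, p.1 ≠ [] ∧ p.1.head? = some '<' ∧ '<' ∉ p.1.tail ∧
    p.2.head? = some '<' ∧ '<' ∉ p.2.tail := by decide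

set_option maxHeartbeats 1000000 in
lemma GOODpair : T16.Pairwise (fun p q => misB p.1 q.1 = true ∧ misB q.1 p.1 = true) := by decide

set_option maxHeartbeats 1000000 in
lemma GOODrep : ∀ p ∈ T16, ∀ q ∈ T16, misB p.1 q.2 = true := by decide


set_option maxHeartbeats 1000000 in
lemma chain_hit (tag rep : List Char) (hmem : (tag, rep) ∈ T16) :
    ∀ r, chainT (tag ++ r) = rep ++ chainT r := by
  obtain ⟨pre, post, hT⟩ := List.append_of_mem hmem
  have hsubpre : ∀ p ∈ pre, p ∈ T16 := fun p hp => hT ▸ List.mem_append_left _ hp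
  have hsubpost : ∀ q ∈ post, q ∈ T16 := fun q hq =>
    hT ▸ List.mem_append_right _ (List.mem_cons_of_mem _ hq)
  have sh := GOODshape (tag, rep) hmem
  have hmis_pre : ∀ p ∈ pre, misB p.1 tag = true := by
    have hpw := GOODpair
    rw [hT, List.pairwise_append] at hpw
    exact fun p hp => (hpw.2.2 p hp (tag, rep) (List.mem_cons_self ..)).1
  intro r
  have e1 : chainT (tag ++ r) = ((tag, rep) :: post).foldl repStep (pre.foldl repStep (tag ++ r)) := by
    rw [chainT, hT, List.foldl_append]
  have e2 : pre.foldl repStep (tag ++ r) = tag ++ pre.foldl repStep r :=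
    chain_pass pre (fun p hp => (GOODshape p (hsubpre p hp)).2.1) tag hmis_pre sh.2.2.1 r
  have e3 : repStep (tag ++ pre.foldl repStep r) (tag, rep)
      = rep ++ repStep (pre.foldl repStep r) (tag, rep) := by
    show PySem.Chars.replace _ tag rep = _
    rw [replace_prefix tag rep _ sh.1 (List.prefix_append _ _), List.drop_left]
    rfl
  have e4 : post.foldl repStep (rep ++ repStep (pre.foldl repStep r) (tag, rep))
      = rep ++ post.foldl repStep (repStep (pre.foldl repStep r) (tag, rep)) :=
    chain_pass post (fun q hq => (GOODshape q (hsubpost q hq)).2.1) rep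
      (fun q hq => GOODrep q (hsubpost q hq) (tag, rep) hmem) sh.2.2.2.2 _
  have e5 : chainT r = post.foldl repStep (repStep (pre.foldl repStep r) (tag, rep)) := by
    rw [chainT, hT, List.foldl_append, List.foldl_cons]
  rw [e1, List.foldl_cons, e2, e3, e4, e5]


lemma hlContains_cases {d : Char} (h : hlColorMap.contains d = true) :
    d = '1' ∨ d = '2' ∨ d = '3' ∨ d = '4' ∨ d = '5' ∨ d = '6' ∨ d = '7' ∨ d = '8' := by
  simp only [hlColorMap, pysem] at h
  rw [show (PySem.Dict.ofList [('1', "#FFD700"), ('2', "#ADFF2F"), ('3', "#87CEEB"), ('4', "#FF69B4"),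
    ('5', "#FFA500"), ('6', "#90EE90"), ('7', "#FF6347"), ('8', "#8A2BE2")]).keys
      = ['1','2','3','4','5','6','7','8'] from by decide] at h
  simpa using h


lemma hlTry_spec {l r u : List Char} (h : hlTry l = some (r, u)) :
    ∃ tag, (tag, r) ∈ T16 ∧ l = tag ++ u := by
  unfold hlTry at h
  split at h
  · rename_i l' d t
    split at h
    · rename_i hc
      obtain ⟨rfl, rfl⟩ := Prod.mk.injEq .. ▸ Option.some.inj h
      refine ⟨['<','/','f','a','c','t',d,'>'], ?_, rfl⟩
      rcases hlContains_cases hc with rfl | rfl | rfl | rfl | rfl | rfl | rfl | rfl <;> decide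
    · exact absurd h (by simp)
  · rename_i l' d t
    split at h
    · rename_i hc
      obtain ⟨rfl, rfl⟩ := Prod.mk.injEq .. ▸ Option.some.inj h
      refine ⟨['<','f','a','c','t',d,'>'], ?_, rfl⟩
      rcases hlContains_cases hc with rfl | rfl | rfl | rfl | rfl | rfl | rfl | rfl <;> decide
    · exact absurd h (by simp)
  · exact absurd h (by simp)

lemma hlTry_of_tag {tag r : List Char} (hmem : (tag, r) ∈ T16) (rest : List Char) :
    hlTry (tag ++ rest) ≠ none := by
  fin_cases hmem
  · rw [show ("<fact1>".toList : List Char) = ['<','f','a','c','t','1','>'] from by decide]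
    simp [hlTry, show hlColorMap.contains '1' = true from by decide]
  · rw [show ("</fact1>".toList : List Char) = ['<','/','f','a','c','t','1','>'] from by decide]
    simp [hlTry, show hlColorMap.contains '1' = true from by decide]
  · rw [show ("<fact2>".toList : List Char) = ['<','f','a','c','t','2','>'] from by decide]
    simp [hlTry, show hlColorMap.contains '2' = true from by decide]
  · rw [show ("</fact2>".toList : List Char) = ['<','/','f','a','c','t','2','>'] from by decide]
    simp [hlTry, show hlColorMap.contains '2' = true from by decide]
  · rw [show ("<fact3>".toList : List Char) = ['<','f','a','c','t','3','>'] from by decide]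
    simp [hlTry, show hlColorMap.contains '3' = true from by decide]
  · rw [show ("</fact3>".toList : List Char) = ['<','/','f','a','c','t','3','>'] from by decide]
    simp [hlTry, show hlColorMap.contains '3' = true from by decide]
  · rw [show ("<fact4>".toList : List Char) = ['<','f','a','c','t','4','>'] from by decide]
    simp [hlTry, show hlColorMap.contains '4' = true from by decide]
  · rw [show ("</fact4>".toList : List Char) = ['<','/','f','a','c','t','4','>'] from by decide]
    simp [hlTry, show hlColorMap.contains '4' = true from by decide]
  · rw [show ("<fact5>".toList : List Char) = ['<','f','a','c','t','5','>'] from by decide]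
    simp [hlTry, show hlColorMap.contains '5' = true from by decide]
  · rw [show ("</fact5>".toList : List Char) = ['<','/','f','a','c','t','5','>'] from by decide]
    simp [hlTry, show hlColorMap.contains '5' = true from by decide]
  · rw [show ("<fact6>".toList : List Char) = ['<','f','a','c','t','6','>'] from by decide]
    simp [hlTry, show hlColorMap.contains '6' = true from by decide]
  · rw [show ("</fact6>".toList : List Char) = ['<','/','f','a','c','t','6','>'] from by decide]
    simp [hlTry, show hlColorMap.contains '6' = true from by decide]
  · rw [show ("<fact7>".toList : List Char) = ['<','f','a','c','t','7','>'] from by decide]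
    simp [hlTry, show hlColorMap.contains '7' = true from by decide]
  · rw [show ("</fact7>".toList : List Char) = ['<','/','f','a','c','t','7','>'] from by decide]
    simp [hlTry, show hlColorMap.contains '7' = true from by decide]
  · rw [show ("<fact8>".toList : List Char) = ['<','f','a','c','t','8','>'] from by decide]
    simp [hlTry, show hlColorMap.contains '8' = true from by decide]
  · rw [show ("</fact8>".toList : List Char) = ['<','/','f','a','c','t','8','>'] from by decide]
    simp [hlTry, show hlColorMap.contains '8' = true from by decide]

lemma hlGo_some {l r u : List Char} (h : hlTry l = some (r, u)) : hlGo l = r ++ hlGo u := by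
  conv_lhs => rw [hlGo]
  simp [h]

lemma hlGo_nil : hlGo [] = [] := by
  conv_lhs => rw [hlGo]
  simp [hlTry]

lemma hlGo_cons {c : Char} {t : List Char} (h : hlTry (c :: t) = none) :
    hlGo (c :: t) = c :: hlGo t := by
  conv_lhs => rw [hlGo]
  simp [h]

lemma hlGo_eq_chainT : ∀ n l, l.length ≤ n → hlGo l = chainT l := by
  intro n
  induction n with
  | zero =>
    intro l hl
    have : l = [] := List.eq_nil_of_length_eq_zero (Nat.le_zero.mp hl)
    subst this
    rw [hlGo_nil, show chainT [] = [] from by decide]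
  | succ n ih =>
    intro l hl
    cases l with
    | nil => rw [hlGo_nil, show chainT [] = [] from by decide]
    | cons c t =>
      cases h : hlTry (c :: t) with
      | some p =>
        obtain ⟨r, u⟩ := p
        obtain ⟨tag, hmem, hEq⟩ := hlTry_spec h
        have htag : tag ≠ [] := (GOODshape (tag, r) hmem).1
        have hlen : u.length ≤ n := by
          have h1 : (c :: t).length = tag.length + u.length := by
            rw [hEq, List.length_append]
          have h2 : 0 < tag.length := List.length_pos_of_ne_nil htag
          simp at h1 hl; omega
        rw [hlGo_some h, hEq, chain_hit tag r hmem u, ih u hlen]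
      | none =>
        rw [hlGo_cons h, ih t (by simpa using hl)]
        refine (chain_cons T16 (fun p hp => ⟨(GOODshape p hp).1, (GOODshape p hp).2.1,
          (GOODshape p hp).2.2.1, (GOODshape p hp).2.2.2.1⟩) c t ?_).symm
        intro p hp hpref
        obtain ⟨rest, hrest⟩ := hpref
        exact hlTry_of_tag (show (p.1, p.2) ∈ T16 from hp) rest (by rw [hrest, h])

lemma A_eq (text : String) : (highlight_tags text).toList = chainT text.toList := by
  simp only [highlight_tags]
  rw [show PySem.List.pyRange 1 9 1 = [1,2,3,4,5,6,7,8] from by decide]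
  simp only [List.foldl_cons, List.foldl_nil]
  simp only [show hlAColorMap.getD 1 "#FFFFFF" = "#FFD700" from by decide,
    show hlAColorMap.getD 2 "#FFFFFF" = "#ADFF2F" from by decide,
    show hlAColorMap.getD 3 "#FFFFFF" = "#87CEEB" from by decide,
    show hlAColorMap.getD 4 "#FFFFFF" = "#FF69B4" from by decide,
    show hlAColorMap.getD 5 "#FFFFFF" = "#FFA500" from by decide,
    show hlAColorMap.getD 6 "#FFFFFF" = "#90EE90" from by decide,
    show hlAColorMap.getD 7 "#FFFFFF" = "#FF6347" from by decide,
    show hlAColorMap.getD 8 "#FFFFFF" = "#8A2BE2" from by decide]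
  simp only [show ("<fact" ++ PySem.Int.toStr 1 ++ ">") = "<fact1>" from by decide,
    show ("</fact" ++ PySem.Int.toStr 1 ++ ">") = "</fact1>" from by decide,
    show ("<span style=\"background-color: " ++ "#FFD700" ++ "; font-weight: bold;\">") = "<span style=\"background-color: #FFD700; font-weight: bold;\">" from by decide,
    show ("<fact" ++ PySem.Int.toStr 2 ++ ">") = "<fact2>" from by decide,
    show ("</fact" ++ PySem.Int.toStr 2 ++ ">") = "</fact2>" from by decide,
    show ("<span style=\"background-color: " ++ "#ADFF2F" ++ "; font-weight: bold;\">") = "<span style=\"background-color: #ADFF2F; font-weight: bold;\">" from by decide,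
    show ("<fact" ++ PySem.Int.toStr 3 ++ ">") = "<fact3>" from by decide,
    show ("</fact" ++ PySem.Int.toStr 3 ++ ">") = "</fact3>" from by decide,
    show ("<span style=\"background-color: " ++ "#87CEEB" ++ "; font-weight: bold;\">") = "<span style=\"background-color: #87CEEB; font-weight: bold;\">" from by decide,
    show ("<fact" ++ PySem.Int.toStr 4 ++ ">") = "<fact4>" from by decide,
    show ("</fact" ++ PySem.Int.toStr 4 ++ ">") = "</fact4>" from by decide,
    show ("<span style=\"background-color: " ++ "#FF69B4" ++ "; font-weight: bold;\">") = "<span style=\"background-color: #FF69B4; font-weight: bold;\">" from by decide,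
    show ("<fact" ++ PySem.Int.toStr 5 ++ ">") = "<fact5>" from by decide,
    show ("</fact" ++ PySem.Int.toStr 5 ++ ">") = "</fact5>" from by decide,
    show ("<span style=\"background-color: " ++ "#FFA500" ++ "; font-weight: bold;\">") = "<span style=\"background-color: #FFA500; font-weight: bold;\">" from by decide,
    show ("<fact" ++ PySem.Int.toStr 6 ++ ">") = "<fact6>" from by decide,
    show ("</fact" ++ PySem.Int.toStr 6 ++ ">") = "</fact6>" from by decide,
    show ("<span style=\"background-color: " ++ "#90EE90" ++ "; font-weight: bold;\">") = "<span style=\"background-color: #90EE90; font-weight: bold;\">" from by decide,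
    show ("<fact" ++ PySem.Int.toStr 7 ++ ">") = "<fact7>" from by decide,
    show ("</fact" ++ PySem.Int.toStr 7 ++ ">") = "</fact7>" from by decide,
    show ("<span style=\"background-color: " ++ "#FF6347" ++ "; font-weight: bold;\">") = "<span style=\"background-color: #FF6347; font-weight: bold;\">" from by decide,
    show ("<fact" ++ PySem.Int.toStr 8 ++ ">") = "<fact8>" from by decide,
    show ("</fact" ++ PySem.Int.toStr 8 ++ ">") = "</fact8>" from by decide,
    show ("<span style=\"background-color: " ++ "#8A2BE2" ++ "; font-weight: bold;\">") = "<span style=\"background-color: #8A2BE2; font-weight: bold;\">" from by decide]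
  simp only [PySem.Str.toList_replace]
  simp only [chainT, T16, repStep, List.foldl_cons, List.foldl_nil]

-- ===== VERDICT (by name: the statement is the Claim_ definition above) =====
theorem highlight_tags_spec : Claim_equal_highlight_tags := by
  intro text _
  unfold Spec_highlight_tags
  have hT : (highlight_tags text).toList = (highlight_tags_alt text).toList := by
    rw [A_eq text]
    unfold highlight_tags_alt
    rw [String.toList_ofList, hlGo_eq_chainT text.toList.length text.toList le_rfl]
  calc highlight_tags text
      = String.ofList (highlight_tags text).toList := String.ofList_toList.symm
    _ = String.ofList (highlight_tags_alt text).toList := by rw [hT]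
    _ = highlight_tags_alt text := String.ofList_toList
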